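-- pv_equiv track=rewrite | github.com/Kefitass/SP-progra | cartas.py | repartir_juego
-- ===== SOURCE A (Python) =====
-- def repartir_juego(mazo_completo):
--
--     pilas_tablero_local = [[] for _ in range(7)]
--     fundaciones_local = [[] for _ in range(4)]
--     mazo_reserva_temp_local = list(mazo_completo)
--
--     for i in range(7):
--         for j in range(i + 1):
--             if len(mazo_reserva_temp_local) > 0:
--                 valor, palo, _ = mazo_reserva_temp_local.pop(0)
--                 boca_arriba = (j == i)
--                 pilas_tablero_local[i].append((valor, palo, boca_arriba))
--
--     mazo_reserva_local = mazo_reserva_temp_local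
--     pila_descarte_local = []
--     return pilas_tablero_local, fundaciones_local, mazo_reserva_local, pila_descarte_local
-- ===== SOURCE B (Python) =====
-- def repartir_juego(mazo_completo):
--     mazo = list(mazo_completo)
--     pilas_tablero_local = []
--     cursor = 0
--     for i in range(7):
--         chunk = mazo[cursor:cursor + (i + 1)]
--         cursor += len(chunk)
--         pilas_tablero_local.append(
--             [(valor, palo, pos == i) for pos, (valor, palo, _) in enumerate(chunk)]
--         )
--     fundaciones_local = [[] for _ in range(4)]
--     return pilas_tablero_local, fundaciones_local, mazo[cursor:], []
-- ===== Notes on version B (the rewrite author's own statement) =====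
-- stated objective: simpler
-- what changed: B deals each tableau pile as one slice chunk over an advancing integer cursor instead of A's nested loops popping the copied deck one card at a time with pop(0), and takes the reserve as the final tail slice.
import Mathlib
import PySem

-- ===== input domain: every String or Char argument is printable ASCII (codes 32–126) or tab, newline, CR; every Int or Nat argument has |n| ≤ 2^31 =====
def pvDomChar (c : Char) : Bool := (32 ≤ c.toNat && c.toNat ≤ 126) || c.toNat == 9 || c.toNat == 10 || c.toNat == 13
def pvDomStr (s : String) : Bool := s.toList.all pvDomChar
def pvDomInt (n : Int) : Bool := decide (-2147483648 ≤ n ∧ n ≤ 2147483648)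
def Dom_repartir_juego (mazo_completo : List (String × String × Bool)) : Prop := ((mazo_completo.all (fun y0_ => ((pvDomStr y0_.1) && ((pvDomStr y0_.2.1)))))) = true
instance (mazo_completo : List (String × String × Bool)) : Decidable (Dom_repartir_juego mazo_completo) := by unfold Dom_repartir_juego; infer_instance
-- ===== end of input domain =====

-- B replaces A's one-card-at-a-time pop(0) dealing with chunk slicing over an integer cursor (objective: simpler; return value only, A does not mutate its argument).

-- ===== PORT A =====
-- A's inner loop body: if the temp deck is nonempty, pop its head onto pile i (face up iff j == i)
def pvStepA (i : Int)
    (st : List (List (String × String × Bool)) × List (String × String × Bool)) (j : Int) :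
    List (List (String × String × Bool)) × List (String × String × Bool) :=
  match st.2 with
  | [] => st
  | c :: rest => (st.1.modify i.toNat (fun p => p ++ [(c.1, c.2.1, j == i)]), rest)

def repartir_juego (mazo_completo : List (String × String × Bool)) :
    (List (List (String × String × Bool))) × (List (List (String × String × Bool))) × (List (String × String × Bool)) × (List (String × String × Bool)) :=
  let pilas_tablero_local : List (List (String × String × Bool)) := List.replicate 7 []
  let fundaciones_local : List (List (String × String × Bool)) := List.replicate 4 []
  let st := (PySem.List.pyRange 0 7 1).foldl
      (fun st i => (PySem.List.pyRange 0 (i + 1) 1).foldl (pvStepA i) st)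
      (pilas_tablero_local, mazo_completo)
  (st.1, fundaciones_local, st.2, [])

-- ===== PORT B =====
-- B's loop body: slice the next chunk at the cursor, append it as pile i (pos == i face up), advance the cursor
def pvStepB (mazo : List (String × String × Bool))
    (st : List (List (String × String × Bool)) × Int) (i : Int) :
    List (List (String × String × Bool)) × Int :=
  let chunk := PySem.List.slice mazo (some st.2) (some (st.2 + (i + 1)))
  (st.1 ++ [(PySem.List.enumerate chunk 0).map (fun pc => (pc.2.1, pc.2.2.1, pc.1 == i))],
   st.2 + chunk.length)

def repartir_juego_alt (mazo_completo : List (String × String × Bool)) :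
    (List (List (String × String × Bool))) × (List (List (String × String × Bool))) × (List (String × String × Bool)) × (List (String × String × Bool)) :=
  let mazo := mazo_completo
  let st := (PySem.List.pyRange 0 7 1).foldl (pvStepB mazo) ([], 0)
  let fundaciones_local : List (List (String × String × Bool)) := List.replicate 4 []
  (st.1, fundaciones_local, PySem.List.slice mazo (some st.2) none, [])

-- ===== PRECONDITION & SPEC =====
def Spec_repartir_juego (mazo_completo : List (String × String × Bool)) (out : (List (List (String × String × Bool))) × (List (List (String × String × Bool))) × (List (String × String × Bool)) × (List (String × String × Bool))) : Prop := out = repartir_juego_alt mazo_completo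
instance (mazo_completo : List (String × String × Bool)) (out : (List (List (String × String × Bool))) × (List (List (String × String × Bool))) × (List (String × String × Bool)) × (List (String × String × Bool))) : Decidable (Spec_repartir_juego mazo_completo out) := by
  unfold Spec_repartir_juego
  letI h1 : DecidableEq (String × String × Bool) := inferInstance
  letI h2 : DecidableEq (List (String × String × Bool)) := inferInstance
  letI h3 : DecidableEq (List (List (String × String × Bool))) := inferInstance
  infer_instance

-- ===== CLAIM (what is proved, stated in full; the proofs are below) =====
def Claim_equal_repartir_juego : Prop := ∀ (mazo_completo : List (String × String × Bool)), Dom_repartir_juego mazo_completo → Spec_repartir_juego mazo_completo (repartir_juego mazo_completo)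

-- ===== LEMMAS AND PROOFS =====

lemma pvModifyId {α : Type} (l : List α) (n : Nat) : (l.modify n fun x => x) = l := by
  apply List.ext_getElem <;> simp [List.getElem_modify]

lemma pvModifyModify {α : Type} (l : List α) (n : Nat) (f g : α → α) :
    (l.modify n f).modify n g = l.modify n (fun x => g (f x)) := by
  apply List.ext_getElem <;> simp [List.getElem_modify]
  intro i h1 h2
  split <;> rfl

-- A's inner dealing loop characterized: pile i gains one card per (j, card) pair, the deck loses js.length cards
lemma pvStepA_fold (i : Int) (js : List Int)
    (piles : List (List (String × String × Bool))) (m : List (String × String × Bool)) :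
    js.foldl (pvStepA i) (piles, m) =
      (piles.modify i.toNat
        (fun p => p ++ (js.zip m).map (fun jc => (jc.2.1, jc.2.2.1, jc.1 == i))),
       m.drop js.length) := by
  induction js generalizing piles m with
  | nil => simp [pvModifyId]
  | cons j js ih =>
    cases m with
    | nil => simp [pvStepA, ih, pvModifyId]
    | cons c rest => simp [pvStepA, ih, pvModifyModify]

def pvRangeI (s : Int) : Nat → List Int
  | 0 => []
  | n+1 => s :: pvRangeI (s+1) n

lemma pvRangeI_length (s : Int) (n : Nat) : (pvRangeI s n).length = n := by
  induction n generalizing s with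
  | zero => rfl
  | succ n ih => simp [pvRangeI, ih]

lemma pvZipEnum {α : Type} (n : Nat) (s : Int) (l : List α) :
    (pvRangeI s n).zip l = PySem.List.enumerate (l.take n) s := by
  induction n generalizing s l with
  | zero => simp [pvRangeI]
  | succ n ih =>
    cases l with
    | nil => simp [pvRangeI]
    | cons a l => simp [pvRangeI, ih, PySem.List.enumerate_cons]

lemma pvDropMin {α : Type} (l : List α) (k : Nat) : l.drop (min k l.length) = l.drop k := by
  rcases Nat.le_total k l.length with h | h
  · simp [Nat.min_eq_left h]
  · simp [Nat.min_eq_right h, List.drop_eq_nil_of_le h]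

-- one B step from a clamped cursor: the chunk is take (i+1) of drop t, and the cursor stays clamped
lemma pvStepB_char (mazo : List (String × String × Bool))
    (piles : List (List (String × String × Bool))) (t : Nat) (i : Int) (hi : 0 ≤ i) :
    pvStepB mazo (piles, ((min t mazo.length : Nat) : Int)) i =
      (piles ++ [(PySem.List.enumerate ((mazo.drop t).take (i + 1).toNat) 0).map
          (fun pc => (pc.2.1, pc.2.2.1, pc.1 == i))],
       ((min (t + (i + 1).toNat) mazo.length : Nat) : Int)) := by
  have hi1 : (i + 1) = (((i + 1).toNat : Nat) : Int) := by omega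
  simp only [pvStepB]
  conv_lhs => rw [hi1]
  rw [PySem.List.slice_natCast_add, pvDropMin]
  simp only [Prod.mk.injEq, List.length_take, List.length_drop]
  refine ⟨trivial, ?_⟩
  push_cast
  omega

lemma pvStepB_char0 (mazo : List (String × String × Bool))
    (piles : List (List (String × String × Bool))) (i : Int) (hi : 0 ≤ i) :
    pvStepB mazo (piles, 0) i =
      (piles ++ [(PySem.List.enumerate (mazo.take (i + 1).toNat) 0).map
          (fun pc => (pc.2.1, pc.2.2.1, pc.1 == i))],
       ((min ((i + 1).toNat) mazo.length : Nat) : Int)) := by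
  simpa using pvStepB_char mazo piles 0 i hi

-- ===== VERDICT (by name: the statement is the Claim_ definition above) =====
theorem repartir_juego_spec : Claim_equal_repartir_juego := by
  intro mazo _
  unfold Spec_repartir_juego repartir_juego repartir_juego_alt
  have h7 : PySem.List.pyRange 0 7 1 = [0, 1, 2, 3, 4, 5, 6] := by decide
  simp only [h7, List.foldl_cons, List.foldl_nil]
  simp only [pvStepA_fold]
  have r1 : PySem.List.pyRange 0 (0+1) 1 = pvRangeI 0 1 := by decide
  have r2 : PySem.List.pyRange 0 (1+1) 1 = pvRangeI 0 2 := by decide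
  have r3 : PySem.List.pyRange 0 (2+1) 1 = pvRangeI 0 3 := by decide
  have r4 : PySem.List.pyRange 0 (3+1) 1 = pvRangeI 0 4 := by decide
  have r5 : PySem.List.pyRange 0 (4+1) 1 = pvRangeI 0 5 := by decide
  have r6 : PySem.List.pyRange 0 (5+1) 1 = pvRangeI 0 6 := by decide
  have r7 : PySem.List.pyRange 0 (6+1) 1 = pvRangeI 0 7 := by decide
  simp only [r1, r2, r3, r4, r5, r6, r7, pvZipEnum, pvRangeI_length]
  simp only [pvStepB_char0, pvStepB_char, Int.reduceLE]
  rw [PySem.List.slice_from_natCast, pvDropMin]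
  simp only [Int.reduceToNat]
  norm_num [List.modify, List.drop_drop, List.replicate]
  exact ⟨⟨rfl, rfl, rfl, rfl, rfl, rfl⟩, rfl⟩
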